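-- pv_equiv track=rewrite | github.com/okunze/Argon40-ArgonOne-Script | source/scripts/argonone-irdecoder-libgpiod.py | pulse2byteNEC
-- ===== SOURCE A (Python) =====
-- PULSEBIT_MAXMICROS_NEC = 2500
--
-- PULSEBIT_ZEROMICROS_NEC = 1000
--
-- def pulse2byteNEC(pulsedata):
-- 	outdata = []
-- 	bitdata = 1
-- 	curbyte = 0
-- 	bitcount = 0
-- 	for (mode, duration) in pulsedata:
-- 		if mode == 1:
-- 			continue
-- 		elif duration > PULSEBIT_MAXMICROS_NEC:
-- 			continue
-- 		elif duration > PULSEBIT_ZEROMICROS_NEC: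
-- 			curbyte = curbyte*2 + 1
-- 		else:
-- 			curbyte = curbyte*2
--
-- 		bitcount = bitcount + 1
-- 		if bitcount == 8:
-- 			outdata.append(curbyte)
-- 			curbyte = 0
-- 			bitcount = 0
-- 	# Shouldn't happen, but just in case
-- 	if bitcount > 0:
-- 		outdata.append(curbyte)
--
-- 	return outdata
-- ===== SOURCE B (Python) =====
-- PULSEBIT_MAXMICROS_NEC = 2500
--
-- PULSEBIT_ZEROMICROS_NEC = 1000
--
-- def pulse2byteNEC(pulsedata):
--     bits = [1 if d > PULSEBIT_ZEROMICROS_NEC else 0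
--             for (m, d) in pulsedata
--             if m != 1 and d <= PULSEBIT_MAXMICROS_NEC]
--     outdata = []
--     while bits:
--         chunk, bits = bits[:8], bits[8:]
--         v = 0
--         for b in chunk:
--             v = v * 2 + b
--         outdata.append(v)
--     return outdata
-- ===== Notes on version B (the rewrite author's own statement) =====
-- stated objective: alternative
-- what changed: Replaces the single state-machine loop (curbyte/bitcount carried across pulses) with two separate passes: one comprehension that filters pulses and maps them to bits, then a chunking loop that folds each group of 8 bits MSB-first into a byte.
import Mathlib
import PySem

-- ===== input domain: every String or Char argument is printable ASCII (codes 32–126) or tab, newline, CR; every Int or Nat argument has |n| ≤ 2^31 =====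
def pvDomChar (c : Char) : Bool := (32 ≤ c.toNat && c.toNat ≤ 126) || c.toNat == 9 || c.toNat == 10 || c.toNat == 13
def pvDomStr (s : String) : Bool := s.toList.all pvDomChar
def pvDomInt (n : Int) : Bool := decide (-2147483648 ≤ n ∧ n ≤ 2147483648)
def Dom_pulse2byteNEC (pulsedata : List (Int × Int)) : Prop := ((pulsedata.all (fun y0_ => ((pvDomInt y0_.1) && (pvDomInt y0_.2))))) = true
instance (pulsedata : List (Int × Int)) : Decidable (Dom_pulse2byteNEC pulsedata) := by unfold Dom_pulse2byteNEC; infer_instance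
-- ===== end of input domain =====

-- B replaces A's single state-machine loop with a filter/map pass building the bit
-- list followed by a chunk-of-8 grouping pass (objective: alternative decomposition).

def PULSEBIT_MAXMICROS_NEC : Int := 2500
def PULSEBIT_ZEROMICROS_NEC : Int := 1000

-- ===== PORT A =====
-- one step of A's for-loop over (mode, duration), state = (outdata, curbyte, bitcount)
def pvStepA (s : List Int × Int × Int) (p : Int × Int) : List Int × Int × Int :=
  let (outdata, curbyte, bitcount) := s
  let (mode, duration) := p
  if mode == 1 then (outdata, curbyte, bitcount)
  else if duration > PULSEBIT_MAXMICROS_NEC then (outdata, curbyte, bitcount)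
  else
    let curbyte := if duration > PULSEBIT_ZEROMICROS_NEC then curbyte * 2 + 1 else curbyte * 2
    let bitcount := bitcount + 1
    if bitcount == 8 then (outdata ++ [curbyte], 0, 0) else (outdata, curbyte, bitcount)

def pulse2byteNEC (pulsedata : List (Int × Int)) : List Int :=
  let (outdata, curbyte, bitcount) := pulsedata.foldl pvStepA ([], 0, 0)
  if bitcount > 0 then outdata ++ [curbyte] else outdata

-- ===== PORT B =====
-- pass 1: the comprehension building the bit list
def pvBits (pulsedata : List (Int × Int)) : List Int :=
  pulsedata.filterMap (fun p =>
    if p.1 ≠ 1 ∧ p.2 ≤ PULSEBIT_MAXMICROS_NEC then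
      some (if p.2 > PULSEBIT_ZEROMICROS_NEC then 1 else 0)
    else none)

-- the inner for-loop folding one chunk MSB-first
def pvByteOf (chunk : List Int) : Int := chunk.foldl (fun v b => v * 2 + b) 0

-- pass 2: the while-loop taking 8 bits at a time
def pvChunks (bits : List Int) : List Int :=
  if h : bits = [] then []
  else pvByteOf (bits.take 8) :: pvChunks (bits.drop 8)
termination_by bits.length
decreasing_by
  have : bits.length ≠ 0 := fun hl => h (List.eq_nil_of_length_eq_zero hl)
  simp [List.length_drop]; omega

def pulse2byteNEC_alt (pulsedata : List (Int × Int)) : List Int :=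
  pvChunks (pvBits pulsedata)

-- ===== PRECONDITION & SPEC =====
def Spec_pulse2byteNEC (pulsedata : List (Int × Int)) (out : List Int) : Prop := out = pulse2byteNEC_alt pulsedata
instance (pulsedata : List (Int × Int)) (out : List Int) : Decidable (Spec_pulse2byteNEC pulsedata out) := by unfold Spec_pulse2byteNEC; infer_instance

-- ===== CLAIM (what is proved, stated in full; the proofs are below) =====
def Claim_equal_pulse2byteNEC : Prop := ∀ (pulsedata : List (Int × Int)), Dom_pulse2byteNEC pulsedata → Spec_pulse2byteNEC pulsedata (pulse2byteNEC pulsedata)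

-- ===== LEMMAS AND PROOFS =====

-- one step of A's loop seen as consuming one bit
def pvBitStep (s : List Int × Int × Int) (b : Int) : List Int × Int × Int :=
  let (outdata, curbyte, bitcount) := s
  let curbyte := curbyte * 2 + b
  let bitcount := bitcount + 1
  if bitcount == 8 then (outdata ++ [curbyte], 0, 0) else (outdata, curbyte, bitcount)

-- partial-byte chunking with Nat bit counter, used to characterise A's loop
def pvChunksP (cur : Int) (cnt : Nat) : List Int → List Int
  | [] => if cnt > 0 then [cur] else []
  | b :: bs => if cnt + 1 = 8 then (cur * 2 + b) :: pvChunksP 0 0 bs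
               else pvChunksP (cur * 2 + b) (cnt + 1) bs

-- A's fold over pulses is the bit-fold over the filtered bit list
theorem foldA_eq_foldBits (ps : List (Int × Int)) (s : List Int × Int × Int) :
    ps.foldl pvStepA s = (pvBits ps).foldl pvBitStep s := by
  induction ps generalizing s with
  | nil => simp [pvBits]
  | cons p ps ih =>
    obtain ⟨m, d⟩ := p
    obtain ⟨o, c, n⟩ := s
    by_cases hm : m = 1
    · simp [pvBits, List.filterMap_cons, pvStepA, hm, ih]
    · by_cases hd : d > PULSEBIT_MAXMICROS_NEC
      · have : ¬ d ≤ PULSEBIT_MAXMICROS_NEC := by omega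
        simp [pvBits, List.filterMap_cons, pvStepA, hm, hd, this, ih]
      · have hle : d ≤ PULSEBIT_MAXMICROS_NEC := by omega
        by_cases hz : d > PULSEBIT_ZEROMICROS_NEC
        · simp [pvBits, List.filterMap_cons, pvStepA, pvBitStep, hm, hd, hle, hz, ih]
        · simp [pvBits, List.filterMap_cons, pvStepA, pvBitStep, hm, hd, hle, hz, ih]

-- the bit-fold plus A's final flush equals partial chunking
theorem foldBits_eq_chunksP (bs : List Int) (o : List Int) (c : Int) (k : Nat)
    (hk : k < 8) :
    (if (bs.foldl pvBitStep (o, c, (k : Int))).2.2 > 0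
     then (bs.foldl pvBitStep (o, c, (k : Int))).1 ++ [(bs.foldl pvBitStep (o, c, (k : Int))).2.1]
     else (bs.foldl pvBitStep (o, c, (k : Int))).1) = o ++ pvChunksP c k bs := by
  induction bs generalizing o c k with
  | nil =>
    simp only [List.foldl_nil]
    by_cases h0 : k = 0
    · subst h0; simp [pvChunksP]
    · have hpos : (0 : Int) < (k : Int) := by omega
      simp [pvChunksP, hpos, Nat.pos_of_ne_zero h0]
  | cons b bs ih =>
    by_cases h7 : k = 7
    · have : pvBitStep (o, c, (k : Int)) b = (o ++ [c * 2 + b], 0, 0) := by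
        simp [pvBitStep, h7]
      rw [List.foldl_cons, this]
      have := ih (o ++ [c * 2 + b]) 0 0 (by omega)
      simp only [Nat.cast_zero] at this
      rw [this]
      simp [pvChunksP, h7]
    · have hne : ((k : Int) + 1 == 8) = false := by
        have : ¬ ((k : Int) + 1 = 8) := by omega
        simpa using this
      have : pvBitStep (o, c, (k : Int)) b = (o, c * 2 + b, (k : Int) + 1) := by
        simp [pvBitStep, hne]
      rw [List.foldl_cons, this]
      have hcast : (k : Int) + 1 = ((k + 1 : Nat) : Int) := by push_cast; ring
      rw [hcast]
      have := ih o (c * 2 + b) (k + 1) (by omega)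
      rw [this]
      have : ¬ (k + 1 = 8) := by omega
      simp [pvChunksP, this]

-- short tail: fewer than 8 - cnt bits left
theorem chunksP_small (bs : List Int) (c : Int) (k : Nat)
    (hk : 0 < k) (h : bs.length + k < 8) :
    pvChunksP c k bs = [bs.foldl (fun v b => v * 2 + b) c] := by
  induction bs generalizing c k with
  | nil => simp [pvChunksP, hk]
  | cons b bs ih =>
    simp only [List.length_cons] at h
    have : ¬ (k + 1 = 8) := by omega
    simp only [pvChunksP, this, if_false]
    rw [ih (c * 2 + b) (k + 1) (by omega) (by omega)]
    simp

-- also from cnt = 0 with a nonempty short list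
theorem chunksP_small0 (bs : List Int) (c : Int)
    (hne : bs ≠ []) (h : bs.length < 8) :
    pvChunksP c 0 bs = [bs.foldl (fun v b => v * 2 + b) c] := by
  cases bs with
  | nil => exact absurd rfl hne
  | cons b bs =>
    simp only [List.length_cons] at h
    have : ¬ (0 + 1 = 8) := by omega
    simp only [pvChunksP, this, if_false]
    by_cases hb : bs = []
    · subst hb; simp [pvChunksP]
    · rw [chunksP_small bs (c * 2 + b) 1 (by omega) (by omega)]
      simp

-- peeling a full chunk of 8 off pvChunksP
theorem chunksP_peel (k : Nat) (bs : List Int) (c : Int)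
    (hk1 : 1 ≤ k) (hk8 : k ≤ 8) (hlen : k ≤ bs.length) :
    pvChunksP c (8 - k) bs =
      ((bs.take k).foldl (fun v b => v * 2 + b) c) :: pvChunksP 0 0 (bs.drop k) := by
  induction k generalizing bs c with
  | zero => omega
  | succ k ih =>
    cases bs with
    | nil => simp at hlen
    | cons b bs =>
      by_cases hk0 : k = 0
      · subst hk0
        have : (8 - 1 : Nat) + 1 = 8 := by omega
        simp [pvChunksP, this]
      · have h1 : (8 - (k + 1) : Nat) + 1 = 8 - k := by omega
        have h3 : ((8 - k : Nat) = 8) = False := by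
          simp only [eq_iff_iff, iff_false]; omega
        simp only [pvChunksP, h1, h3, if_false]
        rw [ih bs (c * 2 + b) (by omega) (by omega) (by simpa using Nat.lt_of_succ_le hlen)]
        simp

-- pvChunksP from the empty state equals B's chunking loop
theorem chunksP_eq_chunks (bs : List Int) : pvChunksP 0 0 bs = pvChunks bs := by
  induction bs using pvChunks.induct with
  | case1 => simp [pvChunksP, pvChunks]
  | case2 bs hne ih =>
    by_cases hlen : bs.length < 8
    · rw [chunksP_small0 bs 0 hne hlen]
      rw [pvChunks]
      have hdrop : bs.drop 8 = [] := by
        apply List.eq_nil_of_length_eq_zero; simp [List.length_drop]; omega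
      have htake : bs.take 8 = bs := List.take_of_length_le (by omega)
      simp [hne, hdrop, htake, pvChunks, pvByteOf]
    · have := chunksP_peel 8 bs 0 (by omega) (by omega) (by omega)
      simp only [Nat.sub_self] at this
      rw [this, ih]
      conv_rhs => rw [pvChunks]
      simp [hne, pvByteOf]

-- ===== VERDICT (by name: the statement is the Claim_ definition above) =====
theorem pulse2byteNEC_spec : Claim_equal_pulse2byteNEC := by
  intro ps _
  show pulse2byteNEC ps = pulse2byteNEC_alt ps
  unfold pulse2byteNEC pulse2byteNEC_alt
  rw [foldA_eq_foldBits]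
  have h := foldBits_eq_chunksP (pvBits ps) [] 0 0 (by omega)
  simp only [Nat.cast_zero, List.nil_append] at h
  rcases hf : List.foldl pvBitStep ([], 0, 0) (pvBits ps) with ⟨o, c, n⟩
  rw [hf] at h
  show (if n > 0 then o ++ [c] else o) = pvChunks (pvBits ps)
  rw [h, chunksP_eq_chunks]
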